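-- pv_equiv track=rewrite | github.com/absognety/Competitive-Coding-Platforms | DailyCodingProblem/getNthPerfectNumber.py | getPerfectNumber
-- ===== SOURCE A (Python) =====
-- def getPerfectNumber(n):
--     x = 11
--     rank = 0
--     while True:
--         digits = [int(i) for i in list(str(x))]
--         if sum(digits) == 10:
--             rank += 1
--             if rank == n:
--                 return x
--         x += 1
-- ===== SOURCE B (Python) =====
-- def getPerfectNumber(n):
--     # Every number with digit sum 10 is congruent to 1 (mod 9) (casting out nines),
--     # so only candidates 19, 28, 37, ... need be examined.  B separates the two
--     # concerns A interleaves: find_next scans this residue class for the next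
--     # digit-sum-10 number, and the nth one is reached by repeating it n-1 times.
--     def digit_sum(y):
--         s = 0
--         while y:
--             s += y % 10
--             y //= 10
--         return s
--
--     def find_next(x):  # least candidate >= x (x ≡ 1 mod 9) with digit sum 10
--         while digit_sum(x) != 10:
--             x += 9
--         return x
--
--     x = find_next(19)
--     for _ in range(n - 1):
--         x = find_next(x + 9)
--     return x
-- ===== Notes on version B (the rewrite author's own statement) =====
-- stated objective: faster
-- what changed: B uses casting-out-nines (digit-sum-10 numbers are all congruent to 1 mod 9) to scan only every 9th integer with an arithmetic digit sum, and is decomposed differently: a find_next helper that locates the next digit-sum-10 candidate, applied n-1 times, instead of A's single while-True loop over all integers with a rank counter and str()-based digit sums.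
-- outside the precondition, e.g. on getPerfectNumber(0): A does not finish within the time limit, B returns 19
import Mathlib
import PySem

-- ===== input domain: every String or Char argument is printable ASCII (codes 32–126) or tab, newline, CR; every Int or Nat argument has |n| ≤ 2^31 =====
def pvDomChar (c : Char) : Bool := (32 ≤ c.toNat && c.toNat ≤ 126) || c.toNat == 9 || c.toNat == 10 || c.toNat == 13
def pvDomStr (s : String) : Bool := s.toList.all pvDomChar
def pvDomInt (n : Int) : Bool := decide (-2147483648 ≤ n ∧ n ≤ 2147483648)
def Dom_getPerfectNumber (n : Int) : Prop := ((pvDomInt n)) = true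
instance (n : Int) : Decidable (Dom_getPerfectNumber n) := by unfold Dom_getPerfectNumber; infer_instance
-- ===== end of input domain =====

-- B scans only candidates ≡ 1 (mod 9) with arithmetic digit sums, split into a
-- next-match search applied n-1 times instead of A's single rank-counting loop.


-- ===== PORT A =====
-- int(i) for one character i of str(x); the getD 0 branch is dead: str(x) of x ≥ 11 is all digits.
def pyDigitVal (c : Char) : Int := (PySem.Int.ofChars? [c]).getD 0

-- digits = [int(i) for i in list(str(x))]; sum(digits)
def sumDigitsA (x : Int) : Int := (((PySem.Int.toStr x).toList).map pyDigitVal).sum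

-- the `while True` loop of A, state (x, rank); the fuel argument only makes the recursion
-- structural (loopA_eq below proves the 19·10^n budget is never exhausted for n ≥ 1).
def loopA : Nat → Int → Int → Int → Int
  | 0, _, _, _ => 0
  | fuel + 1, n, x, rank =>
    if sumDigitsA x = 10 then
      if rank + 1 = n then x
      else loopA fuel n (x + 1) (rank + 1)
    else loopA fuel n (x + 1) rank

def getPerfectNumber (n : Int) : Int := loopA (19 * 10 ^ n.toNat) n 11 0

-- ===== PORT B =====
-- digit_sum: s = 0; while y: s += y % 10; y //= 10 — fuel y.toNat is enough for the
-- number of digits of y, and the `y ≤ 0` test coincides with Python's `while y` (y ≥ 0).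
def digitSumF : Nat → Int → Int → Int
  | 0, s, _ => s
  | fuel + 1, s, y =>
    if y ≤ 0 then s
    else digitSumF fuel (s + PySem.Int.mod y 10) (PySem.Int.floordiv y 10)

def digitSum (s y : Int) : Int := digitSumF y.toNat s y

-- find_next: while digit_sum(x) != 10: x += 9  (fuel-guarded; see findNextF_eq below)
def findNextF : Nat → Int → Int
  | 0, x => x
  | fuel + 1, x =>
    if digitSum 0 x = 10 then x
    else findNextF fuel (x + 9)

-- for _ in range(n - 1): x = find_next(x + 9)
def applyN : Nat → Nat → Int → Int
  | _, 0, x => x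
  | b, k + 1, x => applyN b k (findNextF b (x + 9))

def getPerfectNumber_alt (n : Int) : Int :=
  applyN (19 * 10 ^ n.toNat) (n - 1).toNat (findNextF (19 * 10 ^ n.toNat) 19)

-- ===== PRECONDITION & SPEC =====
-- Pre_ excludes n ≤ 0, on which A's `while True` loop never returns (rank counts upward from 0).
def Pre_getPerfectNumber (n : Int) : Prop := 1 ≤ n
instance (n : Int) : Decidable (Pre_getPerfectNumber n) := by unfold Pre_getPerfectNumber; infer_instance
def pvWitness_getPerfectNumber : Int := (3)

def Spec_getPerfectNumber (n : Int) (out : Int) : Prop := out = getPerfectNumber_alt n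
instance (n : Int) (out : Int) : Decidable (Spec_getPerfectNumber n out) := by unfold Spec_getPerfectNumber; infer_instance

-- ===== CLAIM (what is proved, stated in full; the proofs are below) =====
def Claim_equal_getPerfectNumber : Prop := ∀ (n : Int), Dom_getPerfectNumber n → Pre_getPerfectNumber n → Spec_getPerfectNumber n (getPerfectNumber n)

-- ===== LEMMAS AND PROOFS =====

-- mathematical digit sum (base 10)
def ds10 (m : Nat) : Nat := (Nat.digits 10 m).sum

theorem ds10_19pow (k : Nat) : ds10 (19 * 10 ^ k) = 10 := by
  induction k with
  | zero => decide
  | succ k ih =>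
    have h0 : 0 < 19 * 10 ^ (k + 1) := by positivity
    have hstep := Nat.digits_def' (b := 10) (by decide) h0
    have hm : (19 * 10 ^ (k + 1)) % 10 = 0 := by
      rw [pow_succ, ← mul_assoc]; exact Nat.mul_mod_left _ _
    have hd : 19 * 10 ^ (k + 1) / 10 = 19 * 10 ^ k := by
      rw [pow_succ, ← mul_assoc]; exact Nat.mul_div_cancel _ (by decide)
    unfold ds10 at *
    rw [hstep, hm, hd, List.sum_cons, Nat.zero_add]
    exact ih

theorem exists_ds10_eq (x : Nat) : ∃ y, x ≤ y ∧ ds10 y = 10 := by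
  refine ⟨19 * 10 ^ x, ?_, ds10_19pow x⟩
  calc x ≤ 10 ^ x := le_of_lt (Nat.lt_pow_self (by decide))
  _ ≤ 19 * 10 ^ x := Nat.le_mul_of_pos_left _ (by decide)

-- the least y ≥ x with digit sum 10
def next10 (x : Nat) : Nat := Nat.find (exists_ds10_eq x)

theorem next10_spec (x : Nat) : x ≤ next10 x ∧ ds10 (next10 x) = 10 := Nat.find_spec (exists_ds10_eq x)

theorem next10_min (x y : Nat) (h1 : x ≤ y) (h2 : ds10 y = 10) : next10 x ≤ y :=
  Nat.find_min' (exists_ds10_eq x) ⟨h1, h2⟩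

theorem next10_eq_self (x : Nat) (h : ds10 x = 10) : next10 x = x :=
  Nat.le_antisymm (next10_min x x le_rfl h) (next10_spec x).1

theorem next10_gt (x : Nat) (h : ds10 x ≠ 10) : x < next10 x := by
  rcases Nat.lt_or_ge x (next10 x) with h' | h'
  · exact h'
  · have hs := next10_spec x
    have hx : next10 x = x := by omega
    rw [hx] at hs
    exact absurd hs.2 h

theorem next10_succ (x : Nat) (h : ds10 x ≠ 10) : next10 (x + 1) = next10 x := by
  have hs := next10_spec x
  have hgt := next10_gt x h
  apply Nat.le_antisymm
  · exact next10_min _ _ (by omega) hs.2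
  · exact next10_min _ _ (by have := (next10_spec (x + 1)).1; omega) (next10_spec (x + 1)).2

theorem ds10_mod9 (m : Nat) (h : ds10 m = 10) : m % 9 = 1 := by
  have hmod := Nat.modEq_digits_sum 9 10 (by decide) m
  unfold ds10 at h
  rw [h] at hmod
  simpa [Nat.ModEq] using hmod

theorem next10_add9 (x : Nat) (h9 : x % 9 = 1) (h : ds10 x ≠ 10) : next10 (x + 9) = next10 x := by
  have hs := next10_spec x
  have hgt := next10_gt x h
  have hm : next10 x % 9 = 1 := ds10_mod9 _ hs.2
  apply Nat.le_antisymm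
  · exact next10_min _ _ (by omega) hs.2
  · exact next10_min _ _ (by have := (next10_spec (x + 9)).1; omega) (next10_spec (x + 9)).2

-- the j-th (0-based) number ≥ x with digit sum 10
def nthFrom : Nat → Nat → Nat
  | 0, x => next10 x
  | j + 1, x => nthFrom j (next10 x + 1)

theorem nthFrom_succ (j x : Nat) (h : ds10 x ≠ 10) : nthFrom j (x + 1) = nthFrom j x := by
  cases j <;> simp [nthFrom, next10_succ x h]

theorem nthFrom_next10 (j y : Nat) : nthFrom j (next10 y) = nthFrom j y := by
  cases j <;> simp [nthFrom, next10_eq_self _ (next10_spec y).2]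

theorem next10_le_nthFrom (j x : Nat) : next10 x ≤ nthFrom j x := by
  induction j generalizing x with
  | zero => exact le_rfl
  | succ j ih =>
    have h1 := (next10_spec (next10 x + 1)).1
    have h2 := ih (next10 x + 1)
    show next10 x ≤ nthFrom j (next10 x + 1)
    omega

theorem nthFrom_le (j : Nat) : ∀ (x m : Nat), x ≤ 19 * 10 ^ m → nthFrom j x ≤ 19 * 10 ^ (m + j) := by
  induction j with
  | zero =>
    intro x m hx
    exact next10_min _ _ hx (ds10_19pow m)
  | succ j ih =>
    intro x m hx
    have h1 : next10 x + 1 ≤ 19 * 10 ^ (m + 1) := by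
      have := next10_min _ _ hx (ds10_19pow m)
      have hp : 19 * 10 ^ m + 1 ≤ 19 * 10 ^ (m + 1) := by
        have : 10 ^ m ≥ 1 := Nat.one_le_pow _ _ (by decide)
        rw [pow_succ]
        nlinarith
      omega
    have := ih (next10 x + 1) (m + 1) h1
    show nthFrom j (next10 x + 1) ≤ _
    have he : m + 1 + j = m + (j + 1) := by omega
    rw [he] at this
    exact this

-- the string digit sum of x ≥ 1 is ds10 (via Nat.toDigits, which is what str prints)
theorem pyDigitVal_digitChar (d : Nat) (hd : d < 10) : pyDigitVal (Nat.digitChar d) = (d : Int) := by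
  interval_cases d <;> decide

theorem toDigitsCore_eq : ∀ (fuel n : Nat) (acc : List Char), 0 < n → n < fuel →
    Nat.toDigitsCore 10 fuel n acc = ((Nat.digits 10 n).map Nat.digitChar).reverse ++ acc := by
  intro fuel
  induction fuel with
  | zero => intro n acc h1 h2; omega
  | succ fuel ih =>
    intro n acc h1 h2
    rw [Nat.toDigitsCore]
    by_cases h : n / 10 = 0
    · have hn : n < 10 := by omega
      rw [if_pos h, Nat.digits_def' (by decide) h1, Nat.div_eq_of_lt hn, Nat.digits_zero]
      simp [Nat.mod_eq_of_lt hn]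
    · rw [if_neg h, ih (n / 10) _ (by omega) (by omega)]
      rw [Nat.digits_def' (by decide) h1]
      simp

theorem sumDigitsA_eq (x : Int) (hx : 1 ≤ x) : sumDigitsA x = (ds10 x.toNat : Int) := by
  unfold sumDigitsA
  rw [PySem.Int.toList_toStr]
  have hneg : ¬ x < 0 := by omega
  rw [PySem.Int.toChars, if_neg hneg, Nat.toDigits,
    toDigitsCore_eq _ _ _ (by omega) (by omega), List.append_nil, List.map_reverse,
    List.sum_reverse, List.map_map]
  have hmap : (Nat.digits 10 x.toNat).map (pyDigitVal ∘ Nat.digitChar)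
      = (Nat.digits 10 x.toNat).map Nat.cast := by
    apply List.map_congr_left
    intro d hd
    exact pyDigitVal_digitChar d (Nat.digits_lt_base (by decide) hd)
  rw [hmap, ← Nat.cast_list_sum]
  rfl

-- A's fuelled loop computes nthFrom whenever the fuel covers the distance to the target
theorem loopA_eq (fuel : Nat) : ∀ (n x rank : Int), 11 ≤ x → rank < n →
    nthFrom (n - rank - 1).toNat x.toNat < x.toNat + fuel →
    loopA fuel n x rank = ((nthFrom (n - rank - 1).toNat x.toNat : Nat) : Int) := by
  induction fuel with
  | zero =>
    intro n x rank hx hr hf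
    have h1 := next10_le_nthFrom (n - rank - 1).toNat x.toNat
    have h2 := (next10_spec x.toNat).1
    omega
  | succ fuel ih =>
    intro n x rank hx hr hf
    show (if sumDigitsA x = 10 then _ else _) = _
    by_cases hm : sumDigitsA x = 10
    · have hds : ds10 x.toNat = 10 := by
        have := sumDigitsA_eq x (by omega); rw [hm] at this; exact_mod_cast this.symm
      rw [if_pos hm]
      by_cases he : rank + 1 = n
      · rw [if_pos he]
        have h0 : (n - rank - 1).toNat = 0 := by omega
        rw [h0]
        show x = ((next10 x.toNat : Nat) : Int)
        rw [next10_eq_self _ hds]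
        omega
      · rw [if_neg he]
        have h2 : (n - rank - 1).toNat = (n - (rank + 1) - 1).toNat + 1 := by omega
        have hstep : nthFrom ((n - rank - 1).toNat) x.toNat
            = nthFrom ((n - (rank + 1) - 1).toNat) (x.toNat + 1) := by
          rw [h2]
          show nthFrom _ _ = _
          rw [nthFrom, next10_eq_self _ hds]
        rw [ih n (x + 1) (rank + 1) (by omega) (by omega)
          (by rw [show (x+1).toNat = x.toNat + 1 by omega, ← hstep]; omega)]
        rw [show (x+1).toNat = x.toNat + 1 by omega, ← hstep]
    · have hds : ds10 x.toNat ≠ 10 := by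
        intro h; apply hm; rw [sumDigitsA_eq x (by omega), h]; rfl
      rw [if_neg hm]
      have hstep : nthFrom ((n - rank - 1).toNat) (x.toNat + 1)
          = nthFrom ((n - rank - 1).toNat) x.toNat := nthFrom_succ _ _ hds
      rw [ih n (x + 1) rank (by omega) hr
        (by rw [show (x+1).toNat = x.toNat + 1 by omega, hstep]; omega)]
      rw [show (x+1).toNat = x.toNat + 1 by omega, hstep]

-- B's fuelled digit sum is ds10 for fuel ≥ y.toNat (one digit per unit of fuel is enough)
theorem digitSumF_eq (fuel : Nat) : ∀ (s y : Int), 0 ≤ y → y.toNat ≤ fuel →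
    digitSumF fuel s y = s + (ds10 y.toNat : Int) := by
  induction fuel with
  | zero =>
    intro s y hy hf
    have h0 : y.toNat = 0 := by omega
    show s = _
    rw [h0]
    exact (add_zero s).symm
  | succ fuel ih =>
    intro s y hy hf
    show (if y ≤ 0 then s else _) = _
    by_cases h : y ≤ 0
    · rw [if_pos h]
      have h0 : y.toNat = 0 := by omega
      rw [h0]
      exact (add_zero s).symm
    · rw [if_neg h]
      rw [PySem.Int.mod_eq_emod_of_pos (by decide), PySem.Int.floordiv_eq_ediv_of_pos (by decide)]
      rw [ih _ _ (by omega) (by omega)]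
      have hds : ds10 y.toNat = y.toNat % 10 + ds10 (y.toNat / 10) := by
        unfold ds10
        rw [Nat.digits_def' (b := 10) (by decide) (by omega), List.sum_cons]
      have h1 : (y / 10).toNat = y.toNat / 10 := by omega
      have h2 : y % 10 = ((y.toNat % 10 : Nat) : Int) := by omega
      rw [h1, hds, h2, Nat.cast_add, add_assoc]

theorem digitSum_eq (s y : Int) (hy : 0 ≤ y) : digitSum s y = s + (ds10 y.toNat : Int) :=
  digitSumF_eq y.toNat s y hy le_rfl

-- B's fuelled scan reaches next10 when 9·fuel covers the distance
theorem findNextF_eq (fuel : Nat) : ∀ (x : Int), 1 ≤ x → x % 9 = 1 →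
    next10 x.toNat ≤ x.toNat + 9 * fuel →
    findNextF fuel x = ((next10 x.toNat : Nat) : Int) := by
  induction fuel with
  | zero =>
    intro x hx h9 hf
    have := (next10_spec x.toNat).1
    show x = _
    have he : next10 x.toNat = x.toNat := by omega
    rw [he]; omega
  | succ fuel ih =>
    intro x hx h9 hf
    show (if digitSum 0 x = 10 then x else _) = _
    by_cases hm : digitSum 0 x = 10
    · have hds : ds10 x.toNat = 10 := by
        have := digitSum_eq 0 x (by omega); rw [hm] at this
        have h10 : ((10 : Int)) = ((ds10 x.toNat : Nat) : Int) := by omega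
        exact_mod_cast h10.symm
      rw [if_pos hm, next10_eq_self _ hds]
      omega
    · have hds : ds10 x.toNat ≠ 10 := by
        intro h; apply hm; rw [digitSum_eq 0 x (by omega), h]; rfl
      rw [if_neg hm]
      have ha9 : next10 (x.toNat + 9) = next10 x.toNat := next10_add9 _ (by omega) hds
      rw [ih (x + 9) (by omega) (by omega)
        (by rw [show (x+9).toNat = x.toNat + 9 by omega, ha9]; omega)]
      rw [show (x+9).toNat = x.toNat + 9 by omega, ha9]

theorem applyN_eq (k : Nat) : ∀ (b : Nat) (x : Int), 1 ≤ x → x % 9 = 1 → ds10 x.toNat = 10 →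
    nthFrom k x.toNat ≤ x.toNat + 9 * b →
    applyN b k x = ((nthFrom k x.toNat : Nat) : Int) := by
  induction k with
  | zero =>
    intro b x hx h9 hd hf
    show x = ((next10 x.toNat : Nat) : Int)
    rw [next10_eq_self _ hd]
    omega
  | succ k ih =>
    intro b x hx h9 hd hf
    show applyN b k (findNextF b (x + 9)) = _
    have hstep : nthFrom (k + 1) x.toNat = nthFrom k (x.toNat + 1) := by
      show nthFrom k (next10 x.toNat + 1) = _
      rw [next10_eq_self _ hd]
    have ha9 : next10 (x.toNat + 9) = next10 (x.toNat + 1) := by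
      have h : ∀ i, 1 ≤ i → i ≤ 8 → ds10 (x.toNat + i) ≠ 10 := by
        intro i hi1 hi8 hdd
        have := ds10_mod9 _ hdd; omega
      rw [show x.toNat+9 = (x.toNat+8)+1 by omega, next10_succ _ (h 8 (by omega) (by omega)),
          show x.toNat+8 = (x.toNat+7)+1 by omega, next10_succ _ (h 7 (by omega) (by omega)),
          show x.toNat+7 = (x.toNat+6)+1 by omega, next10_succ _ (h 6 (by omega) (by omega)),
          show x.toNat+6 = (x.toNat+5)+1 by omega, next10_succ _ (h 5 (by omega) (by omega)),
          show x.toNat+5 = (x.toNat+4)+1 by omega, next10_succ _ (h 4 (by omega) (by omega)),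
          show x.toNat+4 = (x.toNat+3)+1 by omega, next10_succ _ (h 3 (by omega) (by omega)),
          show x.toNat+3 = (x.toNat+2)+1 by omega, next10_succ _ (h 2 (by omega) (by omega)),
          show x.toNat+2 = (x.toNat+1)+1 by omega, next10_succ _ (h 1 (by omega) (by omega))]
    have hnle : next10 (x.toNat + 1) ≤ nthFrom k (x.toNat + 1) := next10_le_nthFrom _ _
    have hfe : findNextF b (x + 9) = ((next10 (x.toNat + 1) : Nat) : Int) := by
      rw [findNextF_eq b (x + 9) (by omega) (by omega)
        (by rw [show (x+9).toNat = x.toNat + 9 by omega, ha9]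
            rw [hstep] at hf; omega)]
      rw [show (x+9).toNat = x.toNat + 9 by omega, ha9]
    rw [hfe]
    set v : Nat := next10 (x.toNat + 1) with hv
    have hdv : ds10 v = 10 := (next10_spec _).2
    have hvx : x.toNat + 1 ≤ v := (next10_spec _).1
    have hnth : nthFrom k v = nthFrom k (x.toNat + 1) := nthFrom_next10 k (x.toNat + 1)
    rw [ih b ((v : Nat) : Int) (by omega) (by have := ds10_mod9 _ hdv; omega)
      (by rw [Int.toNat_natCast]; exact hdv)
      (by rw [Int.toNat_natCast, hnth, ← hstep]; omega)]
    rw [Int.toNat_natCast, hnth, hstep]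

theorem nthFrom_11_19 (j : Nat) : nthFrom j 11 = nthFrom j 19 := by
  rw [show (19:Nat) = 18 + 1 from rfl, nthFrom_succ j 18 (by decide),
    show (18:Nat) = 17 + 1 from rfl, nthFrom_succ j 17 (by decide),
    show (17:Nat) = 16 + 1 from rfl, nthFrom_succ j 16 (by decide),
    show (16:Nat) = 15 + 1 from rfl, nthFrom_succ j 15 (by decide),
    show (15:Nat) = 14 + 1 from rfl, nthFrom_succ j 14 (by decide),
    show (14:Nat) = 13 + 1 from rfl, nthFrom_succ j 13 (by decide),
    show (13:Nat) = 12 + 1 from rfl, nthFrom_succ j 12 (by decide),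
    show (12:Nat) = 11 + 1 from rfl, nthFrom_succ j 11 (by decide)]

theorem nthFrom_11_bound (j : Nat) : nthFrom j 11 ≤ 19 * 10 ^ j := by
  have h := nthFrom_le j 11 0 (by decide)
  simpa using h

-- ===== VERDICT (by name: the statement is the Claim_ definition above) =====
theorem getPerfectNumber_spec : Claim_equal_getPerfectNumber := by
  intro n _ hn
  unfold Pre_getPerfectNumber at hn
  show getPerfectNumber n = getPerfectNumber_alt n
  unfold getPerfectNumber getPerfectNumber_alt
  have hj : (n - 1).toNat ≤ n.toNat := by omega
  have hmono : (10:Nat) ^ (n - 1).toNat ≤ 10 ^ n.toNat := Nat.pow_le_pow_right (by decide) hj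
  have hbound : nthFrom (n - 1).toNat 11 ≤ 19 * 10 ^ n.toNat := by
    have := nthFrom_11_bound (n - 1).toNat
    nlinarith
  have hA : loopA (19 * 10 ^ n.toNat) n 11 0
      = ((nthFrom (n - 0 - 1).toNat (11:Int).toNat : Nat) : Int) := by
    apply loopA_eq _ n 11 0 (by decide) (by omega)
    show nthFrom (n - 0 - 1).toNat (11:Int).toNat < (11:Int).toNat + 19 * 10 ^ n.toNat
    rw [show (11:Int).toNat = 11 from rfl, show n - 0 - 1 = n - 1 by ring]
    omega
  have h19 : findNextF (19 * 10 ^ n.toNat) 19 = ((19 : Nat) : Int) := by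
    rw [findNextF_eq _ 19 (by decide) (by decide)
      (by rw [show (19:Int).toNat = 19 from rfl, next10_eq_self 19 (by decide)]; omega)]
    rw [show (19:Int).toNat = 19 from rfl, next10_eq_self 19 (by decide)]
  have hB : applyN (19 * 10 ^ n.toNat) (n - 1).toNat (findNextF (19 * 10 ^ n.toNat) 19)
      = ((nthFrom (n - 1).toNat 19 : Nat) : Int) := by
    rw [h19]
    rw [applyN_eq (n - 1).toNat _ ((19:Nat) : Int) (by decide) (by decide)
      (by rw [Int.toNat_natCast]; decide)
      (by rw [Int.toNat_natCast, ← nthFrom_11_19]; omega)]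
    rw [Int.toNat_natCast]
  rw [hA, hB, show (11:Int).toNat = 11 from rfl, show n - 0 - 1 = n - 1 by ring, nthFrom_11_19]
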